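-- pv_equiv track=rewrite | github.com/abdeahbar/CourseScope | utils.py | _strip_json_comments
-- ===== SOURCE A (Python) =====
-- def _strip_json_comments(text: str) -> str:
--     """Remove // and /* */ comments without touching quoted strings."""
--     result = []
--     in_string = False
--     escaped = False
--     index = 0
--
--     while index < len(text):
--         char = text[index]
--         next_char = text[index + 1] if index + 1 < len(text) else ""
--
--         if in_string:
--             result.append(char)
--             if escaped:
--                 escaped = False
--             elif char == "\\":
--                 escaped = True
--             elif char == '"':
--                 in_string = False
--             index += 1
--             continue
--
--         if char == '"':
--             in_string = True
--             result.append(char)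
--             index += 1
--             continue
--
--         if char == "/" and next_char == "/":
--             index += 2
--             while index < len(text) and text[index] not in "\r\n":
--                 index += 1
--             continue
--
--         if char == "/" and next_char == "*":
--             index += 2
--             while index + 1 < len(text) and not (text[index] == "*" and text[index + 1] == "/"):
--                 index += 1
--             index += 2
--             continue
--
--         result.append(char)
--         index += 1
--
--     return "".join(result)
-- ===== SOURCE B (Python) =====
-- def _strip_json_comments(text: str) -> str:
--     """Remove // and /* */ comments without touching quoted strings.
--
--     Single-pass DFA: an explicit transition function step(state, ch) ->
--     (new_state, emitted) folded over the characters, no lookahead, no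
--     index arithmetic, no nested skip loops.
--     """
--     CODE, STR, ESC, SLASH, LINE, BLOCK, STAR = range(7)
--
--     def step(state, ch):
--         if state == CODE:
--             if ch == '"':
--                 return STR, ch
--             if ch == '/':
--                 return SLASH, ''
--             return CODE, ch
--         if state == STR:
--             if ch == '\\':
--                 return ESC, ch
--             if ch == '"':
--                 return CODE, ch
--             return STR, ch
--         if state == ESC:
--             return STR, ch
--         if state == SLASH:
--             if ch == '/':
--                 return LINE, ''
--             if ch == '*':
--                 return BLOCK, ''
--             if ch == '"':
--                 return STR, '/' + ch
--             return CODE, '/' + ch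
--         if state == LINE:
--             if ch in '\r\n':
--                 return CODE, ch
--             return LINE, ''
--         if state == BLOCK:
--             return (STAR if ch == '*' else BLOCK), ''
--         # STAR
--         if ch == '/':
--             return CODE, ''
--         if ch == '*':
--             return STAR, ''
--         return BLOCK, ''
--
--     state = CODE
--     pieces = []
--     for ch in text:
--         state, emitted = step(state, ch)
--         pieces.append(emitted)
--     if state == SLASH:
--         pieces.append('/')
--     return ''.join(pieces)
-- ===== Notes on version B (the rewrite author's own statement) =====
-- stated objective: alternative
-- what changed: Replaced A's index-walking loop (in_string/escaped flags, one-character lookahead, and two nested skip-loops for // and /* */) by a single-pass 7-state DFA: an explicit transition function step(state, ch) -> (new_state, emitted) folded over the characters with no lookahead, no index arithmetic and no per-character len()/indexing.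
import Mathlib
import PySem

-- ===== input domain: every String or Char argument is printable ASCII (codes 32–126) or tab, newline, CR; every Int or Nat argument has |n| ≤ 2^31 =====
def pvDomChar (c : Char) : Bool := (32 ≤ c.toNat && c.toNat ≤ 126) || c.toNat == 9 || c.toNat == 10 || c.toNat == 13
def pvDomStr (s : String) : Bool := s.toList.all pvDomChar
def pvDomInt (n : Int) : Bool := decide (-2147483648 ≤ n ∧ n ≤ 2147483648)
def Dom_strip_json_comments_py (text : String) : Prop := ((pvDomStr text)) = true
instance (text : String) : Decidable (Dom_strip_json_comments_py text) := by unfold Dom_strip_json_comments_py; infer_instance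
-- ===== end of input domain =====

-- B replaces A's index-walking state machine (flags + nested skip loops + one-char
-- lookahead) by a single-pass 7-state DFA with an explicit transition function and
-- no lookahead; objective: alternative (same linear cost, plainer control flow).

-- ===== PORT A =====
-- inner `while`: skip until the current char is '\r' or '\n' (the newline stays)
def pvSkipLineA : List Char → List Char
  | [] => []
  | c :: rest => if c == '\r' || c == '\n' then c :: rest else pvSkipLineA rest

-- inner `while`: skip until the "*/" pair, then drop it; when `index + 1 < len`
-- fails, `index += 2` runs past the end, i.e. the rest is consumed
def pvSkipBlockA : List Char → List Char
  | c1 :: c2 :: rest => if c1 == '*' && c2 == '/' then rest else pvSkipBlockA (c2 :: rest)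
  | _ => []

-- needed by pvLoopA's termination argument
theorem pvSkipLineA_length (l : List Char) : (pvSkipLineA l).length ≤ l.length := by
  induction l with
  | nil => simp [pvSkipLineA]
  | cons c rest ih =>
    simp only [pvSkipLineA]; split
    · simp
    · exact le_trans ih (by simp)

-- needed by pvLoopA's termination argument
theorem pvSkipBlockA_length (l : List Char) : (pvSkipBlockA l).length ≤ l.length := by
  induction l with
  | nil => simp [pvSkipBlockA]
  | cons c rest ih =>
    cases rest with
    | nil => simp [pvSkipBlockA]
    | cons c2 r =>
      simp only [pvSkipBlockA]; split
      · simp only [List.length_cons]; omega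
      · exact le_trans ih (by simp)

-- the main `while index < len(text)` loop; the list is text[index:], the Bools are
-- the in_string/escaped flags (escaped is carried unchanged through the non-string
-- branches, exactly as the Python variable is); next_char is read off the pattern
def pvLoopA : List Char → Bool → Bool → List Char
  | [], _, _ => []
  | c :: rest, true, esc =>
    c :: (if esc then pvLoopA rest true false
          else if c == '\\' then pvLoopA rest true true
          else if c == '"' then pvLoopA rest false esc
          else pvLoopA rest true esc)
  | [c], false, esc =>                      -- next_char = "" : no comment can start
    if c == '"' then c :: pvLoopA [] true esc
    else c :: pvLoopA [] false esc
  | c :: d :: rest', false, esc =>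
    if c == '"' then c :: pvLoopA (d :: rest') true esc
    else if c == '/' && d == '/' then pvLoopA (pvSkipLineA rest') false esc
    else if c == '/' && d == '*' then pvLoopA (pvSkipBlockA rest') false esc
    else c :: pvLoopA (d :: rest') false esc
termination_by cs _ _ => cs.length
decreasing_by
  all_goals simp only [List.length_cons]
  all_goals first
    | omega
    | (have := pvSkipLineA_length rest'; omega)
    | (have := pvSkipBlockA_length rest'; omega)

def strip_json_comments_py (text : String) : String :=
  String.ofList (pvLoopA text.toList false false)

-- ===== PORT B =====
inductive PvSt | code | str | esc | slash | line | block | star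
deriving DecidableEq

-- B's transition function step(state, ch) -> (new_state, emitted)
def pvStepB (st : PvSt) (ch : Char) : PvSt × List Char :=
  match st with
  | .code =>
    if ch == '"' then (.str, [ch])
    else if ch == '/' then (.slash, [])
    else (.code, [ch])
  | .str =>
    if ch == '\\' then (.esc, [ch])
    else if ch == '"' then (.code, [ch])
    else (.str, [ch])
  | .esc => (.str, [ch])
  | .slash =>
    if ch == '/' then (.line, [])
    else if ch == '*' then (.block, [])
    else if ch == '"' then (.str, ['/', ch])
    else (.code, ['/', ch])
  | .line => if ch == '\r' || ch == '\n' then (.code, [ch]) else (.line, [])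
  | .block => if ch == '*' then (.star, []) else (.block, [])
  | .star =>
    if ch == '/' then (.code, [])
    else if ch == '*' then (.star, [])
    else (.block, [])

-- the `for ch in text` fold of step; the trailing `if state == SLASH: append '/'`
-- is the base case
def pvRunB : PvSt → List Char → List Char
  | st, [] => if st = .slash then ['/'] else []
  | st, c :: rest =>
    let (st', em) := pvStepB st c
    em ++ pvRunB st' rest

def strip_json_comments_py_alt (text : String) : String :=
  String.ofList (pvRunB .code text.toList)

-- ===== PRECONDITION & SPEC =====
def Spec_strip_json_comments_py (text : String) (out : String) : Prop := out = strip_json_comments_py_alt text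
instance (text : String) (out : String) : Decidable (Spec_strip_json_comments_py text out) := by unfold Spec_strip_json_comments_py; infer_instance

-- ===== CLAIM (what is proved, stated in full; the proofs are below) =====
def Claim_equal_strip_json_comments_py : Prop := ∀ (text : String), Dom_strip_json_comments_py text → Spec_strip_json_comments_py text (strip_json_comments_py text)

-- ===== LEMMAS AND PROOFS =====

-- manual equation lemmas for the well-founded pvLoopA
theorem loopA_nil (b e : Bool) : pvLoopA [] b e = [] := by rw [pvLoopA.eq_def]

theorem loopA_str (c : Char) (rest : List Char) (e : Bool) :
    pvLoopA (c :: rest) true e =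
      c :: (if e then pvLoopA rest true false
            else if c == '\\' then pvLoopA rest true true
            else if c == '"' then pvLoopA rest false e
            else pvLoopA rest true e) := by
  rw [pvLoopA.eq_def]

theorem loopA_one (c : Char) (e : Bool) :
    pvLoopA [c] false e =
      (if c == '"' then c :: pvLoopA [] true e else c :: pvLoopA [] false e) := by
  rw [pvLoopA.eq_def]

theorem loopA_two (c d : Char) (rest' : List Char) (e : Bool) :
    pvLoopA (c :: d :: rest') false e =
      (if c == '"' then c :: pvLoopA (d :: rest') true e
       else if c == '/' && d == '/' then pvLoopA (pvSkipLineA rest') false e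
       else if c == '/' && d == '*' then pvLoopA (pvSkipBlockA rest') false e
       else c :: pvLoopA (d :: rest') false e) := by
  rw [pvLoopA.eq_def]

theorem runB_nil (st : PvSt) : pvRunB st [] = if st = .slash then ['/'] else [] := rfl

theorem runB_cons (st : PvSt) (c : Char) (rest : List Char) :
    pvRunB st (c :: rest) = (pvStepB st c).2 ++ pvRunB (pvStepB st c).1 rest := rfl

theorem skipBlock_cons_ne {c : Char} (rest : List Char) (hc : ¬ c = '*') :
    pvSkipBlockA (c :: rest) = pvSkipBlockA rest := by
  cases rest with
  | nil => simp [pvSkipBlockA]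
  | cons c2 r => simp [pvSkipBlockA, hc]

-- the five configuration correspondences (code/str·esc/line/block/star), proved
-- together by strong induction on the length of the remaining input
theorem pvMain (n : Nat) : ∀ l : List Char, l.length ≤ n →
    (pvLoopA l false false = pvRunB .code l) ∧
    (∀ e, pvLoopA l true e = pvRunB (if e then PvSt.esc else PvSt.str) l) ∧
    (pvLoopA (pvSkipLineA l) false false = pvRunB .line l) ∧
    (pvLoopA (pvSkipBlockA l) false false = pvRunB .block l) ∧
    (pvLoopA (pvSkipBlockA ('*' :: l)) false false = pvRunB .star l) := by
  induction n with
  | zero =>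
    intro l hl
    have hnil : l = [] := List.eq_nil_of_length_eq_zero (Nat.le_zero.mp hl)
    subst hnil
    refine ⟨by simp [loopA_nil, runB_nil], fun e => ?_, by simp [pvSkipLineA, loopA_nil, runB_nil],
      by simp [pvSkipBlockA, loopA_nil, runB_nil], by simp [pvSkipBlockA, loopA_nil, runB_nil]⟩
    cases e <;> simp [loopA_nil, runB_nil]
  | succ n ih =>
    intro l hl
    cases l with
    | nil =>
      refine ⟨by simp [loopA_nil, runB_nil], fun e => ?_, by simp [pvSkipLineA, loopA_nil, runB_nil],
        by simp [pvSkipBlockA, loopA_nil, runB_nil], by simp [pvSkipBlockA, loopA_nil, runB_nil]⟩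
      cases e <;> simp [loopA_nil, runB_nil]
    | cons c rest =>
      have hr : rest.length ≤ n := Nat.lt_succ_iff.mp (Nat.lt_of_lt_of_le (by simp) hl)
      -- G2 : inside a string
      have g2 : ∀ e, pvLoopA (c :: rest) true e = pvRunB (if e then PvSt.esc else PvSt.str) (c :: rest) := by
        intro e
        cases e with
        | true =>
          rw [loopA_str, runB_cons]
          simp only [pvStepB]
          simpa using ((ih rest hr).2.1 false)
        | false =>
          rw [loopA_str, runB_cons]
          by_cases hbs : c = '\\'
          · subst hbs
            simpa [pvStepB] using ((ih rest hr).2.1 true)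
          · by_cases hq : c = '"'
            · subst hq
              simpa [pvStepB] using (ih rest hr).1
            · simpa [pvStepB, hbs, hq] using ((ih rest hr).2.1 false)
      -- G1 : top-level code
      have g1 : pvLoopA (c :: rest) false false = pvRunB .code (c :: rest) := by
        cases rest with
        | nil =>
          rw [loopA_one, runB_cons]
          by_cases hq : c = '"'
          · subst hq; simp [pvStepB, loopA_nil, runB_nil]
          · by_cases hs : c = '/'
            · subst hs; simp [pvStepB, loopA_nil, runB_nil]
            · simp [pvStepB, loopA_nil, runB_nil, hq, hs]
        | cons d rest' =>
          have hr' : rest'.length ≤ n := Nat.le_of_succ_le hr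
          rw [loopA_two, runB_cons]
          by_cases hq : c = '"'
          · subst hq
            simpa [pvStepB] using (ih (d :: rest') hr).2.1 false
          · by_cases hs : c = '/'
            · subst hs
              by_cases hd : d = '/'
              · subst hd
                simp only [pvStepB, runB_cons]
                simpa using (ih rest' hr').2.2.1
              · by_cases hb : d = '*'
                · subst hb
                  simp only [pvStepB, runB_cons]
                  simpa using (ih rest' hr').2.2.2.1
                · -- '/' followed by ordinary d : A emits '/' then re-reads d at code level
                  by_cases hdq : d = '"'
                  · subst hdq
                    have hcode := (ih ('"' :: rest') hr).1
                    simp [runB_cons, pvStepB] at hcode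
                    simp [pvStepB, runB_cons, hcode]
                  · have hcode := (ih (d :: rest') hr).1
                    simp [pvStepB, hd, hb, hdq, hcode, runB_cons]
            · have hcode := (ih (d :: rest') hr).1
              simp [pvStepB, hq, hs, hcode, runB_cons]
      -- G3 : inside a // comment
      have g3 : pvLoopA (pvSkipLineA (c :: rest)) false false = pvRunB .line (c :: rest) := by
        by_cases hn : (c == '\r' || c == '\n') = true
        · have hskip : pvSkipLineA (c :: rest) = c :: rest := by simp [pvSkipLineA, hn]
          have hcr : c = '\r' ∨ c = '\n' := by
            rcases Bool.or_eq_true_iff.mp hn with h | h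
            · exact Or.inl (by simpa using h)
            · exact Or.inr (by simpa using h)
          have hq : ¬ c = '"' := by rcases hcr with h | h <;> subst h <;> decide
          have hs : ¬ c = '/' := by rcases hcr with h | h <;> subst h <;> decide
          rw [hskip, g1, runB_cons, runB_cons]
          simp [pvStepB, hn, hq, hs]
        · have hskip : pvSkipLineA (c :: rest) = pvSkipLineA rest := by
            simp [pvSkipLineA, hn]
          rw [hskip, runB_cons]
          simpa [pvStepB, hn] using (ih rest hr).2.2.1
      -- G4 : inside a /* comment, no pending '*'
      have g4 : pvLoopA (pvSkipBlockA (c :: rest)) false false = pvRunB .block (c :: rest) := by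
        by_cases hc : c = '*'
        · subst hc
          rw [runB_cons]
          simpa [pvStepB] using (ih rest hr).2.2.2.2
        · rw [skipBlock_cons_ne rest hc, runB_cons]
          simpa [pvStepB, hc] using (ih rest hr).2.2.2.1
      -- G5 : inside a /* comment, pending '*'
      have g5 : pvLoopA (pvSkipBlockA ('*' :: c :: rest)) false false = pvRunB .star (c :: rest) := by
        rw [runB_cons]
        by_cases hsl : c = '/'
        · subst hsl
          simp only [pvSkipBlockA]
          simpa [pvStepB] using (ih rest hr).1
        · by_cases hst : c = '*'
          · subst hst
            have hskip : pvSkipBlockA ('*' :: '*' :: rest) = pvSkipBlockA ('*' :: rest) := by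
              simp [pvSkipBlockA]
            rw [hskip]
            simpa [pvStepB] using (ih rest hr).2.2.2.2
          · have hskip : pvSkipBlockA ('*' :: c :: rest) = pvSkipBlockA (c :: rest) := by
              simp [pvSkipBlockA, hsl]
            rw [hskip, skipBlock_cons_ne rest hst]
            simpa [pvStepB, hsl, hst] using (ih rest hr).2.2.2.1
      exact ⟨g1, g2, g3, g4, g5⟩

-- ===== VERDICT (by name: the statement is the Claim_ definition above) =====
theorem strip_json_comments_py_spec : Claim_equal_strip_json_comments_py := by
  intro text _
  unfold Spec_strip_json_comments_py strip_json_comments_py strip_json_comments_py_alt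
  exact congrArg String.ofList ((pvMain text.toList.length text.toList le_rfl).1)
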